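-- pv_equiv track=rewrite | github.com/yoojinjangjang/Algorithm_GanSul | 장유진/DFS_BFS/Q18.py | solution
-- ===== SOURCE A (Python) =====
-- def solution(p):
--
--     answer = ""
--     if p == "":
--         return ""
--     # 1. 균형 잡힌 괄호 문자열 찾기
--     u = []
--     cnt = 0
--     i = 0
--     while True:
--         if p[i] == "(":
--             cnt += 1
--             u.append(p[i])
--         elif p[i] == ")":
--             u.append(p[i])
--             cnt -= 1
--         if cnt == 0:
--             break
--         i += 1
--     v = p[i+1:]
--
--     # 3. u가 올바른 괄호 문자열인지 아닌지 구분
--     check = True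
--     stack  = []
--     for i in u:
--         if i == "(":
--             stack.append("(")
--         elif i == ")":
--             if len(stack) == 0:
--                 check = False
--                 break
--             stack.pop()
--
--     if check:
--         v = solution(v)
--         if v is not None:
--             answer = ''.join(u) + v
--         else:
--             answer = ''.join(u)
--         return answer
--     else:
--         answer = '('
--         v = solution(v)
--         answer += v
--         answer += ')'
--         u = u[1:len(u)-1]
--         for i in range(len(u)):
--             if u[i] == "(":
--                 u[i] = ")"
--             else:
--                 u[i] = "("
--         answer += ''.join(u)
--         return answer
-- ===== SOURCE B (Python) =====
-- def solution(p):
--     # Single left-to-right pass splits the input into minimal balanced blocks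
--     # (non-parenthesis characters are dropped, as in the original), then one
--     # right-to-left fold assembles the canonical form; no recursion, no O(n^2) slicing.
--     blocks = []
--     cur = []
--     cnt = 0
--     for c in p:
--         if c == "(" or c == ")":
--             cur.append(c)
--             cnt += 1 if c == "(" else -1
--             if cnt == 0:
--                 blocks.append(cur)
--                 cur = []
--     res = []
--     for b in reversed(blocks):
--         if b[0] == "(":
--             res = b + res
--         else:
--             res = ["("] + res + [")"] + ["(" if ch == ")" else ")" for ch in b[1:-1]]
--     return "".join(res)
-- ===== Notes on version B (the rewrite author's own statement) =====
-- stated objective: faster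
-- what changed: Replaced A's recursion with repeated suffix slicing and a per-block stack check by a single left-to-right pass that splits the string into minimal balanced blocks followed by one right-to-left fold assembling the result (a block is 'correct' iff it starts with '('), joined once at the end.
import Mathlib
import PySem

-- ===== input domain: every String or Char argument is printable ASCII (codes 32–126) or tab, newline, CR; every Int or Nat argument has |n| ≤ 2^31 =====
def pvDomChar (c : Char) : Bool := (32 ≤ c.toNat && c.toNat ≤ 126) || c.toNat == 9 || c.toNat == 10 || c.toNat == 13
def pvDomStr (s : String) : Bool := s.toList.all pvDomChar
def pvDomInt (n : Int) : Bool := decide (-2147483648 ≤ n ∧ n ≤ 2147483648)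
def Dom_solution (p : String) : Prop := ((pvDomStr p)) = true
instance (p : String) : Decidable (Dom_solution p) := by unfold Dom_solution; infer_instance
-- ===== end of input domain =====

-- B replaces A's recursion with suffix slicing and a per-block stack scan by a single
-- left-to-right block-splitting pass plus one right-to-left fold (objective: faster).

-- ===== PORT A =====

-- A's "while True" scan: walks the string char by char, collects parentheses into u,
-- tracks cnt, breaks when cnt == 0; `none` = the loop runs off the end (Python IndexError).
def scanA (l : List Char) (cnt : Int) : Option (List Char × List Char) :=
  match l with
  | [] => none
  | c :: t =>
    let cnt' := if c = '(' then cnt + 1 else if c = ')' then cnt - 1 else cnt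
    let u0 : List Char := if c = '(' ∨ c = ')' then [c] else []
    if cnt' = 0 then some (u0, t)
    else
      match scanA t cnt' with
      | some (u, r) => some (u0 ++ u, r)
      | none => none

-- A's correctness check over u with an explicit stack (break-on-failure loop).
def checkA (l : List Char) (stack : List Char) : Bool :=
  match l with
  | [] => true
  | c :: t =>
    if c = '(' then checkA t ('(' :: stack)
    else if c = ')' then
      match stack with
      | [] => false
      | _ :: s => checkA t s
    else checkA t stack

-- A's in-place flipping loop over u (u[i] = ")" if u[i] == "(" else "(").
def flipA (l : List Char) : List Char :=
  match l with
  | [] => []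
  | c :: t => (if c = '(' then ')' else '(') :: flipA t

-- termination lemma for solA' (cited in decreasing_by)
theorem scanA_cons_inv (c : Char) (t : List Char) (cnt : Int) (u v : List Char)
    (h : scanA (c :: t) cnt = some (u, v)) :
    ((if c = '(' then cnt + 1 else if c = ')' then cnt - 1 else cnt) = 0
       ∧ u = (if c = '(' ∨ c = ')' then [c] else []) ∧ v = t) ∨
    ((if c = '(' then cnt + 1 else if c = ')' then cnt - 1 else cnt) ≠ 0
       ∧ ∃ u', scanA t (if c = '(' then cnt + 1 else if c = ')' then cnt - 1 else cnt) = some (u', v)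
       ∧ u = (if c = '(' ∨ c = ')' then [c] else []) ++ u') := by
  simp only [scanA] at h
  generalize hk : (if c = '(' then cnt + 1 else if c = ')' then cnt - 1 else cnt) = k at h ⊢
  generalize hu : (if c = '(' ∨ c = ')' then ([c] : List Char) else []) = u0 at h ⊢
  by_cases h0 : k = 0
  · rw [if_pos h0, Option.some_inj] at h
    exact Or.inl ⟨h0, congrArg Prod.fst h.symm, (congrArg Prod.snd h).symm⟩
  · rw [if_neg h0] at h
    rcases heq : scanA t k with _ | ⟨u', r⟩ <;> rw [heq] at h
    · exact absurd h (by simp)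
    · rw [Option.some_inj] at h
      have hv : r = v := congrArg Prod.snd h
      subst hv
      exact Or.inr ⟨h0, ⟨u', rfl, congrArg Prod.fst h.symm⟩⟩

theorem scanA_len : ∀ (l : List Char) (cnt : Int) (u v : List Char),
    scanA l cnt = some (u, v) → v.length < l.length := by
  intro l
  induction l with
  | nil => intro cnt u v h; simp [scanA] at h
  | cons c t ih =>
    intro cnt u v h
    rcases scanA_cons_inv c t cnt u v h with ⟨_, _, hv⟩ | ⟨_, u', heq, _⟩
    · subst hv; simp
    · have := ih _ _ _ heq
      simp only [List.length_cons]; omega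

-- A's recursion; the `none` branch is Python's IndexError (outside Pre_solution).
def solA' (l : List Char) : List Char :=
  if l = [] then []
  else
    match h2 : scanA l 0 with
    | none => []  -- Python raises IndexError here; excluded by Pre_solution
    | some (u, v) =>
      if checkA u [] then u ++ solA' v   -- solution(v) is never None, so the join branch
      else '(' :: (solA' v ++ ')' :: flipA (PySem.List.slice u (some 1) (some ((u.length : Int) - 1))))
termination_by l.length
decreasing_by all_goals exact scanA_len _ _ _ _ h2

def solution (p : String) : String := String.mk (solA' p.toList)

-- ===== PORT B =====

-- one pass: split into minimal balanced blocks, dropping non-parenthesis characters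
def blocksB (l : List Char) (cur : List Char) (cnt : Int) : List (List Char) :=
  match l with
  | [] => []
  | c :: t =>
    if c = '(' ∨ c = ')' then
      let cur' := cur ++ [c]
      let cnt' := cnt + (if c = '(' then 1 else -1)
      if cnt' = 0 then cur' :: blocksB t [] 0
      else blocksB t cur' cnt'
    else blocksB t cur cnt

-- the comprehension ["(" if ch == ")" else ")" for ch in b[1:-1]]
def flipB (l : List Char) : List Char := l.map (fun ch => if ch = ')' then '(' else ')')

-- fold step: b[0] is '(' iff the block is already correct (blocks are never empty)
def stepB (res : List Char) (b : List Char) : List Char :=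
  if b.head? = some '(' then b ++ res
  else '(' :: res ++ ')' :: flipB (PySem.List.slice b (some 1) (some (-1)))

def solB' (l : List Char) : List Char :=
  ((blocksB l [] 0).reverse).foldl stepB []

def solution_alt (p : String) : String := String.mk (solB' p.toList)

-- ===== PRECONDITION & SPEC =====
-- Pre_ excludes exactly the inputs on which A raises IndexError: strings whose number of
-- '(' differs from the number of ')' (A's scan loop then runs past the end of the string).
def Pre_solution (p : String) : Prop := p.toList.count '(' = p.toList.count ')'
instance (p : String) : Decidable (Pre_solution p) := by unfold Pre_solution; infer_instance

def pvWitness_solution : String := "())(a()"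

def Spec_solution (p : String) (out : String) : Prop := out = solution_alt p
instance (p : String) (out : String) : Decidable (Spec_solution p out) := by unfold Spec_solution; infer_instance

-- ===== CLAIM (what is proved, stated in full; the proofs are below) =====
def Claim_equal_solution : Prop := ∀ (p : String), Dom_solution p → Pre_solution p → Spec_solution p (solution p)

-- ===== LEMMAS AND PROOFS =====

-- running parenthesis sum (+1 for '(', -1 for ')', 0 otherwise)
def S (l : List Char) : Int :=
  match l with
  | [] => 0
  | c :: t => (if c = '(' then 1 else if c = ')' then -1 else 0) + S t

theorem S_append (a b : List Char) : S (a ++ b) = S a + S b := by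
  induction a with
  | nil => simp [S]
  | cons c t ih => simp [S, ih]; ring

theorem S_eq_count (l : List Char) : S l = (l.count '(' : Int) - (l.count ')' : Int) := by
  induction l with
  | nil => simp [S]
  | cons c t ih =>
    simp only [S, ih, List.count_cons]
    by_cases h1 : c = '('
    · simp [h1]; push_cast; ring
    · by_cases h2 : c = ')'
      · simp [h2]; push_cast; ring
      · simp [h1, h2, Ne.symm]

theorem S_u0 (c : Char) :
    S (if c = '(' ∨ c = ')' then [c] else []) = (if c = '(' then 1 else if c = ')' then -1 else 0) := by
  by_cases h1 : c = '(' <;> by_cases h2 : c = ')' <;> simp [h1, h2, S]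

theorem k_eq (c : Char) (cnt : Int) :
    (if c = '(' then cnt + 1 else if c = ')' then cnt - 1 else cnt)
      = cnt + (if c = '(' then 1 else if c = ')' then -1 else 0) := by
  split_ifs <;> ring

-- totality of A's scan on balanced remainders
theorem scanA_total : ∀ (l : List Char) (cnt : Int), cnt + S l = 0 → l ≠ [] →
    (scanA l cnt).isSome := by
  intro l
  induction l with
  | nil => intro cnt _ h; exact absurd rfl h
  | cons c t ih =>
    intro cnt hsum _
    simp only [scanA]
    by_cases h0 : (if c = '(' then cnt + 1 else if c = ')' then cnt - 1 else cnt) = 0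
    · simp [h0]
    · have hs : (if c = '(' then cnt + 1 else if c = ')' then cnt - 1 else cnt) + S t = 0 := by
        rw [k_eq]; simp only [S] at hsum; omega
      have ht : t ≠ [] := by
        rintro rfl
        rw [show S ([] : List Char) = 0 from rfl] at hs
        omega
      have := ih _ hs ht
      rw [Option.isSome_iff_exists] at this
      obtain ⟨⟨u', r⟩, hx⟩ := this
      simp [h0, hx]

-- structure of a successful scan
theorem scanA_spec : ∀ (l : List Char) (cnt : Int) (u v : List Char),
    scanA l cnt = some (u, v) →
    (∀ c ∈ u, c = '(' ∨ c = ')') ∧ cnt + S u = 0 ∧ S l = S u + S v ∧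
    (∀ q, q <+: u → q ≠ u → q ≠ [] → cnt + S q ≠ 0) := by
  intro l
  induction l with
  | nil => intro cnt u v h; simp [scanA] at h
  | cons c t ih =>
    intro cnt u v h
    rcases scanA_cons_inv c t cnt u v h with ⟨h0, hu, hv⟩ | ⟨h0, u', heq, hu⟩
    · subst hu; subst hv
      refine ⟨?_, ?_, ?_, ?_⟩
      · intro x hx
        by_cases hc : c = '(' ∨ c = ')'
        · simp [hc] at hx; subst hx; exact hc
        · simp [hc] at hx
      · rw [S_u0, ← k_eq, h0]
      · simp only [S, S_u0]
      · intro q hq hqu hqe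
        by_cases hc : c = '(' ∨ c = ')'
        · simp only [hc, if_true] at hq hqu
          rcases List.prefix_cons_iff.mp hq with rfl | ⟨q', rfl, hq'⟩
          · exact absurd rfl hqe
          · have : q' = [] := List.prefix_nil.mp hq'
            subst this; exact absurd rfl hqu
        · simp only [hc, if_false] at hq hqu
          exact absurd (List.prefix_nil.mp hq) hqe
    · obtain ⟨hall', hsum', hS', hpre'⟩ := ih _ _ _ heq
      subst hu
      refine ⟨?_, ?_, ?_, ?_⟩
      · intro x hx
        rcases List.mem_append.mp hx with hx | hx
        · by_cases hc : c = '(' ∨ c = ')'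
          · simp [hc] at hx; subst hx; exact hc
          · simp [hc] at hx
        · exact hall' x hx
      · rw [S_append, S_u0]
        rw [k_eq] at hsum'
        omega
      · simp only [S, S_append, S_u0]
        omega
      · intro q hq hqu hqe
        by_cases hc : c = '(' ∨ c = ')'
        · simp only [hc, if_true, List.singleton_append] at hq hqu
          rcases List.prefix_cons_iff.mp hq with rfl | ⟨q', rfl, hq'⟩
          · exact absurd rfl hqe
          · simp only [S]
            rw [← add_assoc, ← k_eq]
            rcases eq_or_ne q' [] with rfl | hne
            · rw [show S ([] : List Char) = 0 from rfl]; omega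
            · have : q' ≠ u' := fun h => hqu (by rw [h])
              exact hpre' q' hq' this hne
        · simp only [hc, if_false, List.nil_append] at hq hqu
          have := hpre' q hq hqu hqe
          rw [k_eq] at this
          by_cases h1 : c = '(' <;> by_cases h2 : c = ')' <;> simp_all
  -- (no more cases)

-- scan and block-splitting agree when cnt ≠ 0
theorem blocksB_scan : ∀ (l : List Char) (cnt : Int) (cur u v : List Char), cnt ≠ 0 →
    scanA l cnt = some (u, v) → blocksB l cur cnt = (cur ++ u) :: blocksB v [] 0 := by
  intro l
  induction l with
  | nil => intro cnt cur u v _ h; simp [scanA] at h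
  | cons c t ih =>
    intro cnt cur u v hcnt h
    rcases scanA_cons_inv c t cnt u v h with ⟨h0, hu, hv⟩ | ⟨h0, u', heq, hu⟩
    · subst hu; subst hv
      have hc : c = '(' ∨ c = ')' := by
        by_contra hc
        rw [k_eq] at h0
        by_cases h1 : c = '(' <;> by_cases h2 : c = ')' <;> simp_all
      have hk : cnt + (if c = '(' then (1:Int) else -1) = 0 := by
        rcases hc with h1 | h1 <;> subst h1 <;> simp_all <;> omega
      simp only [blocksB, hc, if_true]
      rw [hk]
      simp
    · subst hu
      by_cases hc : c = '(' ∨ c = ')'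
      · have hk : cnt + (if c = '(' then (1:Int) else -1)
            = (if c = '(' then cnt + 1 else if c = ')' then cnt - 1 else cnt) := by
          rcases hc with h1 | h1 <;> subst h1 <;> simp <;> omega
        simp only [blocksB, hc, if_true]
        rw [hk, if_neg h0]
        rw [ih _ _ _ _ h0 heq]
        simp
      · have hk : (if c = '(' then cnt + 1 else if c = ')' then cnt - 1 else cnt) = cnt := by
          by_cases h1 : c = '(' <;> by_cases h2 : c = ')' <;> simp_all
        rw [hk] at heq
        simp only [blocksB, hc, if_false]
        rw [ih _ _ _ _ hcnt heq]
        simp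

-- top-level form of the previous lemma (cnt = 0)
theorem blocksB_scan0 : ∀ (l : List Char) (u v : List Char),
    scanA l 0 = some (u, v) →
    blocksB l [] 0 = (if u = [] then blocksB v [] 0 else u :: blocksB v [] 0) := by
  intro l u v h
  match l with
  | [] => simp [scanA] at h
  | c :: t =>
    rcases scanA_cons_inv c t 0 u v h with ⟨h0, hu, hv⟩ | ⟨h0, u', heq, hu⟩
    · subst hu; subst hv
      have hc : ¬ (c = '(' ∨ c = ')') := by
        rw [k_eq] at h0
        by_cases h1 : c = '(' <;> by_cases h2 : c = ')' <;> simp_all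
      simp only [blocksB, hc, if_false]
      simp
    · subst hu
      have hc : c = '(' ∨ c = ')' := by
        by_contra hc
        rw [k_eq] at h0
        by_cases h1 : c = '(' <;> by_cases h2 : c = ')' <;> simp_all
      have hk : (0:Int) + (if c = '(' then 1 else -1)
          = (if c = '(' then (0:Int) + 1 else if c = ')' then 0 - 1 else 0) := by
        rcases hc with h1 | h1 <;> rw [h1] <;> norm_num
      simp only [blocksB, hc, if_true]
      rw [hk, if_neg h0]
      rw [blocksB_scan _ _ _ _ _ h0 heq]
      simp

-- A's stack check succeeds when the prefix sums never go below -|stack|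
theorem checkA_of_nonneg : ∀ (l : List Char) (stack : List Char),
    (∀ c ∈ l, c = '(' ∨ c = ')') →
    (∀ q, q <+: l → (stack.length : Int) + S q ≥ 0) → checkA l stack = true := by
  intro l
  induction l with
  | nil => intro stack _ _; rfl
  | cons c t ih =>
    intro stack hall hq
    rcases hall c List.mem_cons_self with h1 | h1 <;> subst h1
    · rw [show checkA ('(' :: t) stack = checkA t ('(' :: stack) from rfl]
      refine ih _ (fun x hx => hall x (List.mem_cons_of_mem _ hx)) ?_
      intro q hpre
      have := hq ('(' :: q) (List.cons_prefix_cons.mpr ⟨rfl, hpre⟩)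
      simp only [S, reduceIte] at this
      simp only [List.length_cons]
      push_cast
      omega
    · match stack with
      | [] =>
        have := hq [')'] (List.cons_prefix_cons.mpr ⟨rfl, List.nil_prefix⟩)
        simp [S] at this
      | x :: s =>
        rw [show checkA (')' :: t) (x :: s) = checkA t s from rfl]
        refine ih _ (fun y hy => hall y (List.mem_cons_of_mem _ hy)) ?_
        intro q hpre
        have := hq (')' :: q) (List.cons_prefix_cons.mpr ⟨rfl, hpre⟩)
        simp only [S] at this
        simp only [List.length_cons] at this ⊢
        push_cast at this ⊢
        omega

-- discrete intermediate-value fact for parenthesis prefix sums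
theorem paren_pos : ∀ (t : List Char) (k : Int), (∀ c ∈ t, c = '(' ∨ c = ')') → k > 0 →
    (∀ q, q <+: t → q ≠ t → k + S q ≠ 0) → ∀ q, q <+: t → q ≠ t → k + S q > 0 := by
  intro t
  induction t with
  | nil =>
    intro k _ _ _ q hq hne
    exact absurd (List.prefix_nil.mp hq) hne
  | cons c t' ih =>
    intro k hall hk hnz q hq hne
    rcases List.prefix_cons_iff.mp hq with rfl | ⟨q', rfl, hq'⟩
    · simpa [S] using hk
    · have hne' : q' ≠ t' := fun h => hne (by rw [h])
      rcases eq_or_ne t' [] with rfl | ht'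
      · exact absurd (List.prefix_nil.mp hq') hne'
      · have hallt : ∀ x ∈ t', x = '(' ∨ x = ')' := fun x hx => hall x (List.mem_cons_of_mem _ hx)
        have hc := hall c List.mem_cons_self
        have hscr : ∀ r : List Char, S (c :: r) = (if c = '(' then (1:Int) else -1) + S r := by
          intro r; rcases hc with h1 | h1 <;> simp [h1, S]
        have hk1 : k + (if c = '(' then (1:Int) else -1) ≠ 0 := by
          have := hnz [c] ⟨t', rfl⟩
            (by intro hcc; injection hcc with _ h2; exact ht' h2.symm)
          rw [hscr []] at this
          simpa [S] using this
        have hk'pos : k + (if c = '(' then (1:Int) else -1) > 0 := by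
          rcases hc with h1 | h1 <;> simp [h1] at hk1 ⊢ <;> omega
        have hnz' : ∀ r, r <+: t' → r ≠ t' →
            (k + (if c = '(' then (1:Int) else -1)) + S r ≠ 0 := by
          intro r hr hrne
          have := hnz (c :: r) (List.cons_prefix_cons.mpr ⟨rfl, hr⟩) (by simp [hrne])
          rw [hscr r] at this
          omega
        have := ih _ hallt hk'pos hnz' q' hq' hne'
        rw [hscr q']
        omega

theorem foldl_step_cons (u : List Char) (bs : List (List Char)) :
    ((u :: bs).reverse).foldl stepB [] = stepB ((bs.reverse).foldl stepB []) u := by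
  simp [List.foldl_append]

theorem flipA_eq (l : List Char) (hall : ∀ c ∈ l, c = '(' ∨ c = ')') : flipA l = flipB l := by
  induction l with
  | nil => rfl
  | cons c t ih =>
    rw [flipA, flipB, List.map_cons]
    rw [← flipB, ih (fun x hx => hall x (List.mem_cons_of_mem _ hx))]
    rcases hall c List.mem_cons_self with h1 | h1 <;> simp [h1]

theorem slice_interior (u : List Char) (hu : u ≠ []) :
    PySem.List.slice u (some 1) (some ((u.length : Int) - 1))
      = PySem.List.slice u (some 1) (some (-1)) := by
  simp [PySem.List.slice, PySem.List.clampIdx, hu]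
  omega

theorem main_equiv : ∀ (n : Nat) (l : List Char), l.length ≤ n → S l = 0 → solA' l = solB' l := by
  intro n
  induction n with
  | zero =>
    intro l hl _
    have hln : l = [] := List.eq_nil_of_length_eq_zero (Nat.le_zero.mp hl)
    subst hln
    rw [solA'.eq_def]
    rfl
  | succ n ih =>
    intro l hl hs
    rcases eq_or_ne l [] with rfl | hne
    · rw [solA'.eq_def]
      rfl
    · have htot := scanA_total l 0 (by rw [hs]; ring) hne
      rw [Option.isSome_iff_exists] at htot
      obtain ⟨⟨u, v⟩, hscan⟩ := htot
      obtain ⟨hall, hsum, hS, hmin⟩ := scanA_spec l 0 u v hscan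
      have hSu : S u = 0 := by omega
      have hSv : S v = 0 := by omega
      have hlen : v.length ≤ n :=
        Nat.lt_succ_iff.mp (Nat.lt_of_lt_of_le (scanA_len l 0 u v hscan) hl)
      have ihv := ih v hlen hSv
      have hblocks := blocksB_scan0 l u v hscan
      rw [solA'.eq_def, if_neg hne]
      split
      · next h2 => rw [hscan] at h2; cases h2
      · next u' v' h2 =>
        rw [hscan] at h2
        injection h2 with h2
        injection h2 with h2a h2b
        subst h2a; subst h2b
        rcases eq_or_ne u [] with rfl | hu
        · rw [show checkA [] [] = true from rfl, if_pos rfl, List.nil_append, ihv]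
          unfold solB'
          rw [hblocks, if_pos rfl]
        · have hBstep : solB' l = stepB (solB' v) u := by
            unfold solB'
            rw [hblocks, if_neg hu]
            exact foldl_step_cons u (blocksB v [] 0)
          obtain ⟨c, rest, rfl⟩ := List.exists_cons_of_ne_nil hu
          have hresta : ∀ x ∈ rest, x = '(' ∨ x = ')' :=
            fun x hx => hall x (List.mem_cons_of_mem _ hx)
          rcases hall c List.mem_cons_self with h1 | h1 <;> subst h1
          · -- u starts with '(' : the block is already correct
            have hchk : checkA ('(' :: rest) [] = true := by
              rw [show checkA ('(' :: rest) [] = checkA rest ['('] from rfl]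
              refine checkA_of_nonneg rest ['('] hresta ?_
              intro q hq
              have hSq : S ('(' :: q) = 1 + S q := by simp [S]
              rcases eq_or_ne q rest with rfl | hqr
              · have h0' : S ('(' :: q) = 0 := hSu
                rw [hSq] at h0'
                simp only [List.length_cons, List.length_nil]
                omega
              · have hmin' : ∀ r, r <+: rest → r ≠ rest → (1:Int) + S r ≠ 0 := by
                  intro r hr hrne
                  have := hmin ('(' :: r) (List.cons_prefix_cons.mpr ⟨rfl, hr⟩)
                    (by simp [hrne]) (by simp)
                  rw [show S ('(' :: r) = 1 + S r from by simp [S]] at this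
                  omega
                have := paren_pos rest 1 hresta one_pos hmin' q hq hqr
                simp only [List.length_cons, List.length_nil]
                omega
            rw [hBstep]
            simp only [hchk, stepB, List.head?_cons, ihv]
            simp
          · -- u starts with ')' : the incorrect-block branch
            have hchk : checkA (')' :: rest) [] = false := rfl
            rw [hBstep]
            simp only [hchk, stepB, List.head?_cons, ihv, Bool.false_eq_true, if_false]
            rw [slice_interior _ hu]
            rw [flipA_eq _ (fun x hx => hall x (PySem.List.mem_of_mem_slice _ _ _ hx))]
            simp

-- ===== VERDICT (by name: the statement is the Claim_ definition above) =====
theorem solution_spec : Claim_equal_solution := by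
  intro p _ hpre
  unfold Spec_solution solution solution_alt
  have hs : S p.toList = 0 := by
    rw [S_eq_count]
    unfold Pre_solution at hpre
    omega
  rw [main_equiv p.toList.length p.toList le_rfl hs]
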